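-- pv_equiv track=rewrite | github.com/FabricAttachedMemory/tm-dashboard | blueprints/nodes/blueprint.py | _build_enc_topology
-- ===== SOURCE A (Python) =====
-- from collections import defaultdict
--
-- def _build_enc_topology(nodes_list):
--     ''' Will be called by build_topology() function to build a list of nodes
--         count per enclosure, where position in the array is an enclosure
--         number/name, and value at the position is number of nodes in that
--         enclosure.
--     '''
--     # Originally written to be dependent on full coordinate string like
--     # /MachineVersion/1/DataCenter/FTC/Rack/sdl/Enclosure/U1/EncNum/1/Node/1
--     # but in 2019 this is not the case for SDflex, and may not have been
--     # the case for some time; only the "relative" coordinate is received.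
--     # The divergence no longer matters, and extra core data has been added
--     # to the response.
--     nodes_in_enc = defaultdict(int)
--     for node in nodes_list:
--         node_num = node['node_num']
--         enc_num = node['enc_num']
--         if node_num > nodes_in_enc[enc_num]:
--             nodes_in_enc[enc_num] = node_num
--     return nodes_in_enc
-- ===== SOURCE B (Python) =====
-- from collections import defaultdict
--
-- def _build_enc_topology(nodes_list):
--     groups = defaultdict(list)
--     for node in nodes_list:
--         groups[node['enc_num']].append(node['node_num'])
--     return defaultdict(int,
--                        {enc: max(nums + [0]) for enc, nums in groups.items()})
-- ===== Notes on version B (the rewrite author's own statement) =====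
-- stated objective: alternative
-- what changed: A keeps a running max per enclosure in one defaultdict(int) loop; B first groups all node_nums per enc_num into lists and then reduces each group with max(nums + [0]) in a dict comprehension.
import Mathlib
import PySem

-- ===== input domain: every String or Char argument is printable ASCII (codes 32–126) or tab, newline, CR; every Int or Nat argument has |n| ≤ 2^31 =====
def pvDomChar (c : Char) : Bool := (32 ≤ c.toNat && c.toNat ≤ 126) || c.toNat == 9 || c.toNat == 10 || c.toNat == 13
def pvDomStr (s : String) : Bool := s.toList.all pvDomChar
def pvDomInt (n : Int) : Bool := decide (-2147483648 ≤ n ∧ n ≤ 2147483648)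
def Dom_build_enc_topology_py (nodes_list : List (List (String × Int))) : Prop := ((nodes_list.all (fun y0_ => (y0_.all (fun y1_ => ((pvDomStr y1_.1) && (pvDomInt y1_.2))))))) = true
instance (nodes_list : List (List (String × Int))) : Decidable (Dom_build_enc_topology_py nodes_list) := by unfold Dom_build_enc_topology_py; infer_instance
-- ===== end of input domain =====

-- B replaces A's running-max defaultdict by a group-then-reduce decomposition (append every
-- node_num under its enc_num, then take max(nums + [0]) per enclosure); objective: alternative.

-- ===== PORT A =====
-- A's defaultdict(int): reading nodes_in_enc[enc_num] inserts the key with 0 (setdefault).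
-- node['node_num'] / node['enc_num'] are dict lookups; Python raises KeyError when the key is
-- missing — those inputs are excluded by Pre_ below, the .getD 0 default is never reached there.
def build_enc_topology_py (nodes_list : List (List (String × Int))) : List (Int × Int) :=
  (nodes_list.foldl (fun nodes_in_enc node =>
      let node_num : Int := ((PySem.Dict.ofList node).get? "node_num").getD 0
      let enc_num : Int := ((PySem.Dict.ofList node).get? "enc_num").getD 0
      let d := nodes_in_enc.setdefault enc_num 0
      if node_num > d.getD enc_num 0 then d.insert enc_num node_num else d)
    PySem.Dict.empty).items

-- ===== PORT B =====
-- groups[node['enc_num']].append(node['node_num']) per node, then {enc: max(nums + [0])}.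
def build_enc_topology_py_alt (nodes_list : List (List (String × Int))) : List (Int × Int) :=
  let groups : PySem.Dict Int (List Int) :=
    nodes_list.foldl (fun groups node =>
        groups.modify (((PySem.Dict.ofList node).get? "enc_num").getD 0) []
          (fun nums => nums ++ [((PySem.Dict.ofList node).get? "node_num").getD 0]))
      PySem.Dict.empty
  groups.items.map (fun p => (p.1, (PySem.List.max? (p.2 ++ [0]) id).getD 0))

-- ===== PRECONDITION & SPEC =====
-- Pre_ excludes exactly the inputs where Python A raises KeyError: a node dict missing the
-- 'node_num' or 'enc_num' key.
def Pre_build_enc_topology_py (nodes_list : List (List (String × Int))) : Prop :=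
  ∀ node ∈ nodes_list, (PySem.Dict.ofList node).contains "node_num" = true ∧
    (PySem.Dict.ofList node).contains "enc_num" = true
instance (nodes_list : List (List (String × Int))) : Decidable (Pre_build_enc_topology_py nodes_list) := by unfold Pre_build_enc_topology_py; infer_instance
def pvWitness_build_enc_topology_py : (List (List (String × Int))) :=
  [[("node_num", 2), ("enc_num", 1)], [("node_num", -3), ("enc_num", 7)]]
def Spec_build_enc_topology_py (nodes_list : List (List (String × Int))) (out : List (Int × Int)) : Prop := out = build_enc_topology_py_alt nodes_list
instance (nodes_list : List (List (String × Int))) (out : List (Int × Int)) : Decidable (Spec_build_enc_topology_py nodes_list out) := by unfold Spec_build_enc_topology_py; infer_instance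

-- ===== CLAIM (what is proved, stated in full; the proofs are below) =====
def Claim_equal_build_enc_topology_py : Prop := ∀ (nodes_list : List (List (String × Int))), Dom_build_enc_topology_py nodes_list → Pre_build_enc_topology_py nodes_list → Spec_build_enc_topology_py nodes_list (build_enc_topology_py nodes_list)

-- ===== LEMMAS AND PROOFS =====

-- value reduction of B: (e, nums) ↦ (e, max(nums + [0]))
def pvRed (p : Int × List Int) : Int × Int :=
  (p.1, (PySem.List.max? (p.2 ++ [0]) id).getD 0)

lemma max?_cons_eq_foldl (xs : List Int) (a : Int) :
    PySem.List.max? (a :: xs) id = some (xs.foldl max a) := by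
  induction xs generalizing a with
  | nil => simp [PySem.List.max?]
  | cons x xs ih =>
      have h : PySem.List.max? (a :: x :: xs) id = PySem.List.max? (max a x :: xs) id := by
        simp only [PySem.List.max?, List.foldl_cons, id_eq]
        split_ifs with hx
        · rw [max_eq_right (le_of_lt hx)]
        · rw [max_eq_left (by omega)]
      rw [h, ih (max a x), List.foldl_cons]

lemma foldl_max_shift (l : List Int) (a b : Int) :
    l.foldl max (max a b) = max (l.foldl max a) b := by
  induction l generalizing a with
  | nil => rfl
  | cons y l ih =>
      simp only [List.foldl_cons]
      rw [show max (max a b) y = max (max a y) b by omega, ih]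

lemma mxv_eq_foldl (vs : List Int) :
    (PySem.List.max? (vs ++ [0]) id).getD 0 = vs.foldl max 0 := by
  cases vs with
  | nil => decide
  | cons x xs =>
      rw [List.cons_append, max?_cons_eq_foldl, Option.getD_some, List.foldl_append,
        List.foldl_cons, List.foldl_nil, List.foldl_cons,
        show max 0 x = max x 0 from max_comm 0 x, foldl_max_shift]

-- f preserves the key, so contains / find? over the mapped items agree
lemma contains_mapRed (l : List (Int × List Int)) (e : Int) :
    (PySem.Dict.mk (l.map pvRed)).contains e = (PySem.Dict.mk l).contains e := by
  simp [PySem.Dict.contains, List.any_map, Function.comp_def, pvRed]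

lemma get?_mapRed (l : List (Int × List Int)) (e : Int) :
    (PySem.Dict.mk (l.map pvRed)).get? e
      = ((PySem.Dict.mk l).get? e).map (fun vs => (PySem.List.max? (vs ++ [0]) id).getD 0) := by
  simp [PySem.Dict.get?, List.find?_map, Function.comp_def, pvRed, Option.map_map]

lemma mxv_append (vs : List Int) (n : Int) :
    (PySem.List.max? ((vs ++ [n]) ++ [0]) id).getD 0
      = max ((PySem.List.max? (vs ++ [0]) id).getD 0) n := by
  rw [mxv_eq_foldl, mxv_eq_foldl, List.foldl_append, List.foldl_cons, List.foldl_nil]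

lemma step_eq (g : PySem.Dict Int (List Int)) (h : g.keys.Nodup) (n e : Int) :
    (let d := (PySem.Dict.mk (g.items.map pvRed)).setdefault e 0
     if n > d.getD e 0 then d.insert e n else d)
    = PySem.Dict.mk ((g.modify e [] (fun vs => vs ++ [n])).items.map pvRed) := by
  by_cases hc : g.contains e = true
  · -- key already present
    obtain ⟨vs, hvs⟩ : ∃ vs, g.get? e = some vs := by
      rw [PySem.Dict.contains_eq_isSome_get?] at hc
      exact Option.isSome_iff_exists.mp hc
    have hmem : (e, vs) ∈ g.items := PySem.Dict.mem_items_of_get?_eq_some g hvs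
    have hcm : (PySem.Dict.mk (g.items.map pvRed)).contains e = true := by
      rw [contains_mapRed]; exact hc
    have hgetD : (PySem.Dict.mk (g.items.map pvRed)).getD e 0
        = (PySem.List.max? (vs ++ [0]) id).getD 0 := by
      rw [PySem.Dict.getD, get?_mapRed]
      rw [show (PySem.Dict.mk g.items).get? e = g.get? e from rfl, hvs]
      rfl
    have hmod : g.modify e [] (fun vs => vs ++ [n]) = g.insert e (vs ++ [n]) := by
      rw [PySem.Dict.modify, PySem.Dict.getD, hvs]
      rfl
    have hitems := PySem.Dict.items_insert_of_contains g (vs ++ [n]) hc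
    simp only [PySem.Dict.setdefault, hcm, if_pos, hmod, hitems]
    by_cases hlt : n > (PySem.List.max? (vs ++ [0]) id).getD 0
    · rw [if_pos (by rw [hgetD]; exact hlt)]
      simp only [PySem.Dict.insert, hcm, if_pos]
      congr 1
      rw [List.map_map, List.map_map]
      refine List.map_congr_left (fun p hp => ?_)
      simp only [Function.comp_apply, pvRed]
      by_cases he : p.1 = e
      · simp only [he, beq_self_eq_true, if_pos]
        have : (PySem.List.max? ((vs ++ [n]) ++ [0]) id).getD 0 = n := by
          rw [mxv_append]; omega
        simp only [List.append_assoc, List.cons_append, List.nil_append] at this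
        simp [this]
      · simp [he]
    · rw [if_neg (by rw [hgetD]; exact hlt)]
      congr 1
      rw [List.map_map]
      refine (List.map_congr_left (fun p hp => ?_)).symm
      simp only [Function.comp_apply]
      by_cases he : p.1 = e
      · have hpv : p = (e, vs) :=
          List.inj_on_of_nodup_map h hp hmem (by simpa using he)
        have : (PySem.List.max? ((vs ++ [n]) ++ [0]) id).getD 0
            = (PySem.List.max? (vs ++ [0]) id).getD 0 := by
          rw [mxv_append]; omega
        simp only [List.append_assoc, List.cons_append, List.nil_append] at this
        simp [pvRed, hpv, this]
      · simp [he]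
  · -- new key
    have hc' : g.contains e = false := by simpa using hc
    have hvs : g.get? e = none := (PySem.Dict.get?_eq_none_iff_contains g e).mpr hc'
    have hnomatch : ∀ p ∈ g.items, ¬ (p.1 == e) = true := by
      have hany : g.items.any (fun q => q.1 == e) = false := hc'
      rw [List.any_eq_false] at hany
      exact hany
    have hcm : (PySem.Dict.mk (g.items.map pvRed)).contains e = false := by
      rw [contains_mapRed]; exact hc'
    have hmod : g.modify e [] (fun vs => vs ++ [n]) = g.insert e ([] ++ [n]) := by
      rw [PySem.Dict.modify, PySem.Dict.getD, hvs]; rfl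
    have hitems := PySem.Dict.items_insert_of_not_contains g (([] : List Int) ++ [n]) hc'
    have hfind : (g.items.map pvRed).find? (fun p => p.1 == e) = none := by
      refine List.find?_eq_none.mpr (fun p hp => ?_)
      obtain ⟨q, hq, rfl⟩ := List.mem_map.mp hp
      exact hnomatch q hq
    have hsd : (PySem.Dict.mk (g.items.map pvRed)).setdefault e 0
        = PySem.Dict.mk (g.items.map pvRed ++ [(e, 0)]) := by
      simp only [PySem.Dict.setdefault, hcm]
      rfl
    have hget0 : (PySem.Dict.mk (g.items.map pvRed ++ [(e, 0)])).getD e 0 = 0 := by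
      simp only [PySem.Dict.getD, PySem.Dict.get?, List.find?_append, hfind]
      simp
    have hcontains2 : (PySem.Dict.mk (g.items.map pvRed ++ [(e, 0)])).contains e = true := by
      simp [PySem.Dict.contains]
    have hmx : (PySem.List.max? ([n] ++ [0]) id).getD 0 = max 0 n := by
      rw [mxv_eq_foldl]; rfl
    simp only [hsd, hmod, hitems, hget0]
    by_cases hlt : n > (0 : Int)
    · rw [if_pos hlt]
      simp only [PySem.Dict.insert, hcontains2, if_pos, List.map_append,
        List.map_cons, List.map_nil]
      congr 2
      · rw [List.map_map]
        refine List.map_congr_left (fun p hp => ?_)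
        exact if_neg (hnomatch p hp)
      · simp only [beq_self_eq_true, if_pos, pvRed, List.nil_append, hmx]
        rw [show max 0 n = n by omega]
    · rw [if_neg hlt]
      simp only [List.map_append, List.map_cons, List.map_nil]
      congr 2
      simp only [pvRed, List.nil_append, hmx]
      rw [show max 0 n = 0 by omega]

lemma fold_inv (ns : List (List (String × Int))) (g : PySem.Dict Int (List Int))
    (h : g.keys.Nodup) :
    ns.foldl (fun nodes_in_enc node =>
      let node_num : Int := ((PySem.Dict.ofList node).get? "node_num").getD 0
      let enc_num : Int := ((PySem.Dict.ofList node).get? "enc_num").getD 0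
      let d := nodes_in_enc.setdefault enc_num 0
      if node_num > d.getD enc_num 0 then d.insert enc_num node_num else d)
      (PySem.Dict.mk (g.items.map pvRed))
    = PySem.Dict.mk ((ns.foldl (fun groups node =>
        groups.modify (((PySem.Dict.ofList node).get? "enc_num").getD 0) []
          (fun nums => nums ++ [((PySem.Dict.ofList node).get? "node_num").getD 0]))
        g).items.map pvRed) := by
  induction ns generalizing g with
  | nil => rfl
  | cons node ns ih =>
      simp only [List.foldl_cons]
      rw [step_eq g h]
      exact ih _ (by
        have : ∀ (k : Int) (f0 : List Int → List Int),
            (g.modify k [] f0).keys.Nodup := by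
          intro k f0
          exact PySem.Dict.nodup_keys_insert _ _ _ h
        exact this _ _)

-- ===== VERDICT (by name: the statement is the Claim_ definition above) =====
theorem build_enc_topology_py_spec : Claim_equal_build_enc_topology_py := by
  intro nodes_list _ _
  show _ = _
  unfold build_enc_topology_py build_enc_topology_py_alt
  have h := fold_inv nodes_list PySem.Dict.empty (by simp [PySem.Dict.keys, PySem.Dict.empty])
  simp only [PySem.Dict.empty] at h
  rw [show ({ items := [] } : PySem.Dict Int (List Int)).items.map pvRed = [] from rfl] at h
  exact congrArg PySem.Dict.items h
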